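-- pv_equiv track=rewrite | github.com/ankmathur96/Election-Tracker | election_visualize/twitter_politics/logic/sentiment.py | clean_and_tokenize
-- ===== SOURCE A (Python) =====
-- def clean(s):
--     return s.translate(s.maketrans({ord(x) : '' for x in '.,/><!123456789'})).lower()
--
-- def parse_hashtag(htag, words_dict, removed=False):
--     #remove hashtag.
--     if '_' in htag or '+' in htag:
--         return htag.split('_')
--     if len(htag) == 0:
--         return []
--     if not removed:
--         htag = htag[1:]
--     l_bound, r_bound = 0, len(htag)
--     tokens, cur = [], htag
--     while (l_bound != r_bound):
--         if cur in words_dict and len(cur) > 1: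
--             tokens.append(cur)
--             if r_bound == len(htag):
--                 return tokens
--             htag = htag[r_bound:len(htag)]
--             l_bound = 0
--             r_bound = len(htag)
--         else:
--             r_bound -= 1
--         cur = htag[l_bound:r_bound]
--     if len(htag) != 0:
--         tokens.extend(parse_hashtag(htag[1:], words_dict, True))
--     return tokens
--
-- def clean_and_tokenize(sentence, scores):
--     sentence = clean(sentence)
--     words = sentence.split()
--     clean_sentence = []
--     for word in words:
--         if word[0] == '#':
--             parsed_tokens = parse_hashtag(word, scores)
--             if len(parsed_tokens) > 0:
--                 clean_sentence.extend(parsed_tokens)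
--         else:
--             clean_sentence.append(word)
--     return clean_sentence
-- ===== SOURCE B (Python) =====
-- def clean_and_tokenize(sentence, scores):
--     cleaned = sentence.translate(str.maketrans('', '', '.,/><!123456789')).lower()
--     out = []
--     maxlen = None
--     for word in cleaned.split():
--         if word[0] != '#':
--             out.append(word)
--         elif '_' in word or '+' in word:
--             out.extend(word.split('_'))
--         else:
--             if maxlen is None:
--                 maxlen = max(map(len, scores), default=0)
--             out.extend(_segment(word[1:], scores, maxlen))
--     return out
--
--
-- def _segment(s, scores, maxlen):
--     # suffix DP: dp[m] = token list for the suffix of s of length m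
--     n = len(s)
--     dp = [[]]
--     for m in range(1, n + 1):
--         suf = s[n - m:]
--         L = next((L for L in range(min(m, maxlen), 1, -1) if suf[:L] in scores), None)
--         dp.append(([suf[:L]] + dp[m - L]) if L is not None else dp[m - 1])
--     return dp[n]
-- ===== Notes on version B (the rewrite author's own statement) =====
-- stated objective: alternative
-- what changed: Replaces parse_hashtag's greedy prefix scan with drop-one-char backtracking restarts by a bottom-up suffix DP over the hashtag that tries only candidate token lengths up to the longest dictionary key, computing each suffix's segmentation once.
import Mathlib
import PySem

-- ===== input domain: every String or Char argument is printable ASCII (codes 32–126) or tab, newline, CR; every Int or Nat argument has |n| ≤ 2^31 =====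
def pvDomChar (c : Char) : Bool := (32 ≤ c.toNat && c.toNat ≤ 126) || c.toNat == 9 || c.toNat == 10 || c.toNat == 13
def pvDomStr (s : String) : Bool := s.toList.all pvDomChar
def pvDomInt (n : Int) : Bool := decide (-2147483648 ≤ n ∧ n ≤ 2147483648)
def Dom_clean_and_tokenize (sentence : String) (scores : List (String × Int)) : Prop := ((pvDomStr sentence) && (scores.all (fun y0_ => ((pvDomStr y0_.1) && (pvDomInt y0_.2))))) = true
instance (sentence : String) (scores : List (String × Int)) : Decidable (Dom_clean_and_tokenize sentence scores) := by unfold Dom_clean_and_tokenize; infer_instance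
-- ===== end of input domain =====

-- B replaces A's per-hashtag greedy prefix scan with drop-one-char backtracking restarts by a
-- bottom-up suffix DP capped at the longest dictionary key (objective: alternative).


-- characters deleted by clean() (note: '0' is NOT among them)
def pvSpecials : List Char := ['.', ',', '/', '>', '<', '!', '1', '2', '3', '4', '5', '6', '7', '8', '9']

-- `cur in words_dict`: dict-key membership of the word (exact: a key is present iff some pair carries it)
def pvMemKey (scores : List (String × Int)) (w : List Char) : Bool :=
  scores.any (fun p => p.1.toList == w)

-- ===== PORT A =====
-- clean(): translate with an all-delete table removes exactly the chars of pvSpecials, then .lower()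
def pvCleanA (s : List Char) : List Char :=
  PySem.Chars.lower (s.filter (fun c => !pvSpecials.contains c))

mutual
-- parse_hashtag
def pvParseA (scores : List (String × Int)) (htag : List Char) (removed : Bool) : List String :=
  if PySem.Chars.isIn ['_'] htag || PySem.Chars.isIn ['+'] htag then
    (PySem.Chars.splitOn htag ['_']).map String.ofList
  else if htag.length = 0 then []
  else if !removed then          -- htag = htag[1:]
    pvLoopA scores (htag.drop 1) (htag.drop 1).length []
  else
    pvLoopA scores htag htag.length []
  termination_by (htag.length, htag.length + 1)

-- the while loop of parse_hashtag (l_bound is always 0; r = r_bound); at loop entry cur = htag[0:r]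
def pvLoopA (scores : List (String × Int)) (htag : List Char) (r : Nat) (tokens : List String) : List String :=
  if hr0 : r = 0 then
    -- loop exit, then the post-loop recursion
    if hne : htag.length ≠ 0 then tokens ++ pvParseA scores (htag.drop 1) true else tokens
  else
    let cur := htag.take r
    if hc : pvMemKey scores cur && decide (1 < cur.length) then
      if r = htag.length then tokens ++ [String.ofList cur]
      else pvLoopA scores (htag.drop r) (htag.drop r).length (tokens ++ [String.ofList cur])
    else pvLoopA scores htag (r - 1) tokens
  termination_by (htag.length, r)
  decreasing_by
  · exact Prod.Lex.left _ _ (by simp only [List.length_drop]; omega)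
  · have h2 := hc
    simp only [Bool.and_eq_true, decide_eq_true_eq, List.length_take, cur] at h2
    exact Prod.Lex.left _ _ (by simp only [List.length_drop]; omega)
  · exact Prod.Lex.right _ (by omega)
end

def clean_and_tokenize (sentence : String) (scores : List (String × Int)) : List String :=
  let cleaned := pvCleanA sentence.toList
  let words := PySem.Chars.split₀ cleaned
  words.foldl (fun acc word =>
    if PySem.List.pyGet? word 0 == some '#' then      -- word[0] == '#' (words from split() are nonempty)
      let parsed := pvParseA scores word false
      if 0 < parsed.length then acc ++ parsed else acc
    else acc ++ [String.ofList word]) []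

-- ===== PORT B =====
-- translate with a deletion table removes exactly the chars of pvSpecials, then .lower()
def pvCleanB (s : List Char) : List Char :=
  PySem.Chars.lower (s.filter (fun c => !pvSpecials.contains c))

-- max(map(len, scores), default=0), the longest dictionary key (a running max; lazily computed in Source B,
-- but it is a pure value, so the port computes it where it is used)
def pvMaxLen (scores : List (String × Int)) : Nat :=
  scores.foldl (fun acc p => max acc p.1.toList.length) 0

-- range(M, 1, -1) = [M, M-1, ..., 2]
def pvDown2 (M : Nat) : List Nat := (List.range' 2 (M - 1)).reverse

-- _segment: suffix DP; range(1, n+1) ported as List.range n with m = m0 + 1 (indices are nonnegative)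
def pvSegB (scores : List (String × Int)) (maxlen : Nat) (s : List Char) : List String :=
  let n := s.length
  let dp := (List.range n).foldl (fun dp m0 =>
      let m := m0 + 1
      let suf := s.drop (n - m)
      let L? := (pvDown2 (min m maxlen)).find? (fun L => pvMemKey scores (suf.take L))
      dp ++ [match L? with
             | some L => String.ofList (suf.take L) :: dp.getD (m - L) []
             | none => dp.getD (m - 1) []]) [[]]
  dp.getD n []

def clean_and_tokenize_alt (sentence : String) (scores : List (String × Int)) : List String :=
  let cleaned := pvCleanB sentence.toList
  (PySem.Chars.split₀ cleaned).foldl (fun out word =>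
    if !(PySem.List.pyGet? word 0 == some '#') then out ++ [String.ofList word]
    else if PySem.Chars.isIn ['_'] word || PySem.Chars.isIn ['+'] word then
      out ++ (PySem.Chars.splitOn word ['_']).map String.ofList
    else out ++ pvSegB scores (pvMaxLen scores) (word.drop 1)) []

-- ===== PRECONDITION & SPEC =====
def Spec_clean_and_tokenize (sentence : String) (scores : List (String × Int)) (out : List String) : Prop := out = clean_and_tokenize_alt sentence scores
instance (sentence : String) (scores : List (String × Int)) (out : List String) : Decidable (Spec_clean_and_tokenize sentence scores out) := by unfold Spec_clean_and_tokenize; infer_instance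

-- ===== CLAIM (what is proved, stated in full; the proofs are below) =====
def Claim_equal_clean_and_tokenize : Prop := ∀ (sentence : String) (scores : List (String × Int)), Dom_clean_and_tokenize sentence scores → Spec_clean_and_tokenize sentence scores (clean_and_tokenize sentence scores)

-- ===== LEMMAS AND PROOFS =====

lemma pvDown2_mem {M r : Nat} : r ∈ pvDown2 M ↔ 2 ≤ r ∧ r ≤ M := by
  simp [pvDown2, List.mem_range'_1]
  omega


lemma pvDown2_cons {M : Nat} (h : 2 ≤ M) : pvDown2 M = M :: pvDown2 (M - 1) := by
  have h1 : M - 1 = (M - 2) + 1 := by omega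
  have h2 : 2 + (M - 2) = M := by omega
  simp [pvDown2, h1, List.range'_concat, h2]

lemma find?_pvDown2_eq (p : Nat → Bool) {M m : Nat} (hMm : M ≤ m)
    (hfail : ∀ r, M < r → r ≤ m → p r = false) :
    (pvDown2 m).find? p = (pvDown2 M).find? p := by
  induction m using Nat.strong_induction_on with
  | _ m ih =>
    by_cases hm : m ≤ M
    · have : m = M := by omega
      subst this; rfl
    · rw [Nat.not_le] at hm
      by_cases h2 : 2 ≤ m
      · rw [pvDown2_cons h2, List.find?_cons_of_neg (by simp [hfail m hm le_rfl])]
        exact ih (m - 1) (by omega) (by omega) (fun r h1 h2' => hfail r h1 (by omega))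
      · have hM : M = 0 := by omega
        interval_cases m <;> simp_all [pvDown2]

lemma find?_pvDown2_none (p : Nat → Bool) {m : Nat}
    (hall : ∀ r, 2 ≤ r → r ≤ m → p r = false) : (pvDown2 m).find? p = none := by
  refine List.find?_eq_none.mpr (fun x hx => ?_)
  have := pvDown2_mem.mp hx
  simp [hall x this.1 this.2]

lemma find?_pvDown2_some (p : Nat → Bool) {v m : Nat} (h2 : 2 ≤ v) (hvm : v ≤ m)
    (hv : p v = true) (habove : ∀ r, v < r → r ≤ m → p r = false) :
    (pvDown2 m).find? p = some v := by
  rw [find?_pvDown2_eq p hvm habove, pvDown2_cons h2, List.find?_cons_of_pos hv]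

-- the best (longest) candidate token at the head of s
def pvBest (scores : List (String × Int)) (s : List Char) : Option Nat :=
  (pvDown2 s.length).find? (fun r => pvMemKey scores (s.take r))

-- reference segmentation: longest dictionary prefix (length ≥ 2), else drop one char
def pvSeg (scores : List (String × Int)) (s : List Char) : List String :=
  match h : pvBest scores s with
  | some r => String.ofList (s.take r) :: pvSeg scores (s.drop r)
  | none =>
    match s with
    | [] => []
    | _ :: t => pvSeg scores t
termination_by s.length
decreasing_by
· have hr : 2 ≤ r ∧ r ≤ s.length := pvDown2_mem.mp (List.mem_of_find?_eq_some h)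
  simp only [List.length_drop]; omega
· simp only [List.length_cons]; omega

lemma pvSeg_nil (scores : List (String × Int)) : pvSeg scores [] = [] := by
  rw [pvSeg]
  split
  · rename_i r hr; simp [pvBest, pvDown2] at hr
  · rfl

lemma pvSeg_some {scores : List (String × Int)} {s : List Char} {r : Nat}
    (h : pvBest scores s = some r) :
    pvSeg scores s = String.ofList (s.take r) :: pvSeg scores (s.drop r) := by
  rw [pvSeg]; split <;> simp_all

lemma pvSeg_none {scores : List (String × Int)} {c : Char} {t : List Char}
    (h : pvBest scores (c :: t) = none) :
    pvSeg scores (c :: t) = pvSeg scores t := by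
  rw [pvSeg]; split <;> simp_all


lemma pvBest_cap {scores : List (String × Int)} {maxlen : Nat}
    (hmax : ∀ w : List Char, pvMemKey scores w = true → w.length ≤ maxlen)
    {s : List Char} {m : Nat} (hs : s.length = m) :
    (pvDown2 (min m maxlen)).find? (fun L => pvMemKey scores (s.take L)) = pvBest scores s := by
  rw [pvBest, hs]
  refine (find?_pvDown2_eq _ (by omega) ?_).symm
  intro r h1 h2
  by_contra hcon
  rw [Bool.not_eq_false] at hcon
  have := hmax _ hcon
  rw [List.length_take, hs] at this
  omega

lemma pvMaxLen_bound (scores : List (String × Int)) :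
    ∀ w : List Char, pvMemKey scores w = true → w.length ≤ pvMaxLen scores := by
  intro w hw
  rcases List.any_eq_true.mp hw with ⟨p, hp, hpw⟩
  have : p.1.toList = w := by simpa using hpw
  subst this
  exact (PySem.List.le_foldl_max_nat scores (fun p => p.1.toList.length) 0).2 p hp

lemma pvIsInSingle {c : Char} {t : List Char} : PySem.Chars.isIn [c] t = false ↔ c ∉ t := by
  rw [PySem.Chars.isIn_eq_false_iff]
  constructor
  · intro h hc
    rcases List.mem_iff_append.mp hc with ⟨l1, l2, rfl⟩
    exact h ⟨l1, l2, by simp⟩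
  · intro h hinf
    exact h (hinf.sublist.subset (by simp))

-- ===== B equals the reference segmentation =====
lemma pvSegB_inv {scores : List (String × Int)} {maxlen : Nat}
    (hmax : ∀ w : List Char, pvMemKey scores w = true → w.length ≤ maxlen)
    (s : List Char) :
    ∀ t, t ≤ s.length →
    (List.range t).foldl (fun dp m0 =>
      dp ++ [match (pvDown2 (min (m0 + 1) maxlen)).find?
                (fun L => pvMemKey scores ((s.drop (s.length - (m0 + 1))).take L)) with
             | some L => String.ofList ((s.drop (s.length - (m0 + 1))).take L) :: dp.getD (m0 + 1 - L) []
             | none => dp.getD (m0 + 1 - 1) []]) [[]]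
    = (List.range (t+1)).map (fun k => pvSeg scores (s.drop (s.length - k))) := by
  intro t
  induction t with
  | zero =>
    intro _
    simp [List.drop_length, pvSeg_nil]
  | succ t ih =>
    intro ht
    rw [List.range_succ, List.foldl_append, ih (by omega)]
    simp only [List.foldl_cons, List.foldl_nil]
    have hsuf : (s.drop (s.length - (t+1))).length = t + 1 := by
      simp only [List.length_drop]; omega
    have hcap := pvBest_cap (maxlen := maxlen) hmax hsuf
    rw [hcap]
    have hrhs : (List.range (t+1+1)).map (fun k => pvSeg scores (s.drop (s.length - k)))
        = (List.range (t+1)).map (fun k => pvSeg scores (s.drop (s.length - k)))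
          ++ [pvSeg scores (s.drop (s.length - (t+1)))] := by
      rw [List.range_succ, List.map_append]; rfl
    rw [hrhs]
    congr 1
    rcases hbest : pvBest scores (s.drop (s.length - (t+1))) with _ | L
    · -- no token: entry = dp[t]
      simp only []
      rw [PySem.List.getD_map_range _ (t+1) (t+1-1) [] (by omega)]
      obtain ⟨c, rest, hcr⟩ := List.exists_cons_of_ne_nil
        (show s.drop (s.length - (t+1)) ≠ [] by intro h; rw [h] at hsuf; simp at hsuf)
      rw [hcr] at hbest
      rw [hcr, pvSeg_none hbest]
      have : rest = s.drop (s.length - t) := by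
        have h1 : (s.drop (s.length - (t+1))).tail = s.drop (s.length - (t+1) + 1) := List.tail_drop
        rw [hcr] at h1
        simp only [List.tail_cons] at h1
        rw [h1]
        congr 1
        omega
      rw [this]
      have : t + 1 - 1 = t := by omega
      rw [this]
    · -- token of length L at the head of the suffix
      have hL : 2 ≤ L ∧ L ≤ t + 1 := by
        have := List.mem_of_find?_eq_some (by rw [pvBest] at hbest; exact hbest)
        rw [hsuf] at this
        exact pvDown2_mem.mp this
      simp only []
      rw [PySem.List.getD_map_range _ (t+1) (t+1-L) [] (by omega)]
      rw [pvSeg_some hbest, List.drop_drop]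
      have hidx : s.length - (t + 1) + L = s.length - (t + 1 - L) := by omega
      rw [hidx]

lemma pvSegB_eq {scores : List (String × Int)} {maxlen : Nat}
    (hmax : ∀ w : List Char, pvMemKey scores w = true → w.length ≤ maxlen)
    (s : List Char) : pvSegB scores maxlen s = pvSeg scores s := by
  show ((List.range s.length).foldl (fun dp m0 =>
      dp ++ [match (pvDown2 (min (m0 + 1) maxlen)).find?
                (fun L => pvMemKey scores ((s.drop (s.length - (m0 + 1))).take L)) with
             | some L => String.ofList ((s.drop (s.length - (m0 + 1))).take L) :: dp.getD (m0 + 1 - L) []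
             | none => dp.getD (m0 + 1 - 1) []]) [[]]).getD s.length [] = pvSeg scores s
  rw [pvSegB_inv hmax s s.length le_rfl]
  rw [PySem.List.getD_map_range _ (s.length + 1) s.length [] (by omega)]
  simp

-- ===== A equals the reference segmentation =====
lemma pvLoopA_eq (scores : List (String × Int)) :
    ∀ N htag, htag.length ≤ N → '_' ∉ htag → '+' ∉ htag →
    ∀ r, r ≤ htag.length →
    (∀ r', r < r' → r' ≤ htag.length → 2 ≤ r' → pvMemKey scores (htag.take r') = false) →
    ∀ tokens, pvLoopA scores htag r tokens = tokens ++ pvSeg scores htag := by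
  intro N
  induction N with
  | zero =>
    intro htag hN _ _ r hr _ tokens
    have h0 : htag = [] := by
      cases htag with
      | nil => rfl
      | cons a l => simp at hN
    subst h0
    have hr0 : r = 0 := by simpa using hr
    subst hr0
    rw [pvLoopA]
    simp [pvSeg_nil]
  | succ N ihN =>
    intro htag hN h_ hp r
    induction r with
    | zero =>
      intro _ habove tokens
      rw [pvLoopA, dif_pos rfl]
      by_cases hne : htag.length ≠ 0
      · rw [dif_pos hne]
        obtain ⟨c, t, rfl⟩ := List.exists_cons_of_ne_nil (l := htag) (fun h => hne (by simp [h]))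
        have hbest : pvBest scores (c :: t) = none := by
          rw [pvBest]
          exact find?_pvDown2_none _ (fun r' hr2 hrm => habove r' (by omega) hrm hr2)
        rw [pvSeg_none hbest]
        simp only [List.drop_succ_cons, List.drop_zero]
        congr 1
        -- pvParseA scores t true = pvSeg scores t
        rw [pvParseA]
        rw [if_neg (by
          simp [pvIsInSingle.mpr (fun hm => h_ (List.mem_cons_of_mem _ hm)),
                pvIsInSingle.mpr (fun hm => hp (List.mem_cons_of_mem _ hm))])]
        by_cases ht0 : t.length = 0
        · have htnil : t = [] := by
            cases t with
            | nil => rfl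
            | cons a l => simp at ht0
          rw [if_pos ht0, htnil, pvSeg_nil]
        · rw [if_neg ht0]
          simp only [Bool.not_true, Bool.false_eq_true, if_false]
          rw [ihN t (by simp only [List.length_cons] at hN; omega)
            (fun hm => h_ (List.mem_cons_of_mem _ hm)) (fun hm => hp (List.mem_cons_of_mem _ hm))
            t.length le_rfl (fun r' h1 h2 _ => absurd h1 (by omega)) []]
          simp
      · rw [dif_neg hne]
        have h0 : htag = [] := by
          cases htag with
          | nil => rfl
          | cons a l => simp at hne
        rw [h0, pvSeg_nil, List.append_nil]
    | succ r ihr =>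
      intro hrlen habove tokens
      rw [pvLoopA, dif_neg (Nat.succ_ne_zero r)]
      have hcl : (htag.take (r+1)).length = r + 1 := by
        simp only [List.length_take]; omega
      by_cases hc : (pvMemKey scores (htag.take (r+1)) && decide (1 < (htag.take (r+1)).length)) = true
      · rw [dif_pos hc]
        rw [Bool.and_eq_true, decide_eq_true_eq, hcl] at hc
        have hbest : pvBest scores htag = some (r+1) := by
          rw [pvBest]
          exact find?_pvDown2_some _ (by omega) hrlen hc.1
            (fun r' h1 h2 => habove r' h1 h2 (by omega))
        by_cases heq : r + 1 = htag.length
        · rw [if_pos heq, pvSeg_some hbest]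
          rw [heq, List.drop_length, pvSeg_nil]
        · rw [if_neg heq]
          rw [ihN (htag.drop (r+1)) (by simp only [List.length_drop]; omega)
            (fun hm => h_ (List.mem_of_mem_drop hm)) (fun hm => hp (List.mem_of_mem_drop hm))
            (htag.drop (r+1)).length le_rfl (fun r' h1 h2 _ => absurd h1 (by omega))
            (tokens ++ [String.ofList (htag.take (r+1))])]
          rw [pvSeg_some hbest]
          simp
      · rw [dif_neg hc]
        refine ihr (by omega) (fun r' h1 h2 h3 => ?_) tokens
        rcases Nat.lt_or_ge (r+1) r' with h4 | h4
        · exact habove r' h4 h2 h3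
        · have hr' : r' = r + 1 := by omega
          subst hr'
          rw [Bool.and_eq_true, decide_eq_true_eq, hcl] at hc
          rcases Bool.eq_false_or_eq_true (pvMemKey scores (htag.take (r+1))) with hm | hm
          · exact absurd ⟨hm, by omega⟩ hc
          · exact hm

lemma pvParseA_false_eq {scores : List (String × Int)} {w : List Char}
    (h1 : '_' ∉ w) (h2 : '+' ∉ w) (hw : w ≠ []) :
    pvParseA scores w false = pvSeg scores (w.drop 1) := by
  rw [pvParseA]
  rw [if_neg (by simp [pvIsInSingle.mpr h1, pvIsInSingle.mpr h2])]
  rw [if_neg (by simp [hw])]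
  simp only [Bool.not_false]
  rw [pvLoopA_eq scores (w.drop 1).length (w.drop 1) le_rfl
    (fun hm => h1 (List.mem_of_mem_drop hm)) (fun hm => h2 (List.mem_of_mem_drop hm))
    (w.drop 1).length le_rfl (by omega) []]
  simp

theorem clean_and_tokenize_spec : Claim_equal_clean_and_tokenize := by
  intro sentence scores _dom
  unfold Spec_clean_and_tokenize clean_and_tokenize clean_and_tokenize_alt
  simp only [pvCleanA, pvCleanB]
  refine PySem.List.foldl_congr_mem _ _ _ _ (fun acc w hw => ?_)
  by_cases hb : (PySem.List.pyGet? w 0 == some '#') = true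
  · -- hashtag word
    rw [if_pos hb, if_neg (show ¬(!(PySem.List.pyGet? w 0 == some '#')) = true by rw [hb]; simp)]
    have hstep : (if 0 < (pvParseA scores w false).length then acc ++ pvParseA scores w false else acc)
        = acc ++ pvParseA scores w false := by
      rcases pvParseA scores w false with _ | ⟨a, l⟩ <;> simp
    rw [hstep]
    by_cases hus : (PySem.Chars.isIn ['_'] w || PySem.Chars.isIn ['+'] w) = true
    · rw [if_pos hus, pvParseA, if_pos hus]
    · rw [if_neg hus]
      rw [Bool.or_eq_true, not_or, Bool.not_eq_true, Bool.not_eq_true] at hus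
      have hwne : w ≠ [] := by
        intro h; rw [h] at hb; simp [PySem.List.pyGet?] at hb
      rw [pvParseA_false_eq (pvIsInSingle.mp hus.1) (pvIsInSingle.mp hus.2) hwne]
      rw [pvSegB_eq (pvMaxLen_bound scores) (w.drop 1)]
  · rw [if_neg hb, if_pos (by simpa using hb)]
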